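-- pv_equiv track=rewrite | github.com/AdamZhouSE/pythonHomework | Code/CodeRecords/2126/60737/243776.py | div_subset
-- ===== SOURCE A (Python) =====
-- import copy
--
-- def div_subset(nums):
--     if len(nums) < 2:
--         return nums[0]
--     nums.sort()
--     sub = [[i] for i in nums]
--     maxlenl = 0
--     maxsub = []
--     for i in range(1, len(nums)):
--         maxlen = 0
--         for j in range(i):
--             index = 1
--             if nums[i]%nums[j] == 0 and len(sub[j])+1 > maxlen:
--                 sub[i] = copy.deepcopy(sub[j])
--                 sub[i].append(nums[i])
--                 maxlen = len(sub[j])+1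
--         if len(sub[i]) > maxlenl:
--             maxlenl = len(sub[i])
--             maxsub = sub[i]
--     return maxsub
-- ===== SOURCE B (Python) =====
-- def div_subset(nums):
--     # Same sort + O(n^2) DP, but with parent pointers instead of O(n) chain
--     # copies: reconstruct the subset once at the end. (Sorts nums in place,
--     # like the original.)
--     if len(nums) < 2:
--         return nums
--     nums.sort()
--     n = len(nums)
--     length = [1] * n
--     parent = [-1] * n
--     for i in range(1, n):
--         for j in range(i):
--             if nums[i] % nums[j] == 0 and length[j] + 1 > length[i]:
--                 length[i] = length[j] + 1
--                 parent[i] = j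
--     best = 1
--     for i in range(2, n):
--         if length[i] > length[best]:
--             best = i
--     chain = []
--     i = best
--     while i != -1:
--         chain.append(nums[i])
--         i = parent[i]
--     return chain[::-1]
-- ===== Notes on version B (the rewrite author's own statement) =====
-- stated objective: faster
-- what changed: B keeps the same sort + quadratic DP loop but stores only (chain length, parent index) per element instead of deep-copying the whole candidate chain inside the inner loop; the subset is reconstructed once at the end by following parent pointers.
-- outside the precondition, e.g. on div_subset([5]): A returns 5, B returns [5]; on div_subset([]): A raises IndexError, B returns []
import Mathlib
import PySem

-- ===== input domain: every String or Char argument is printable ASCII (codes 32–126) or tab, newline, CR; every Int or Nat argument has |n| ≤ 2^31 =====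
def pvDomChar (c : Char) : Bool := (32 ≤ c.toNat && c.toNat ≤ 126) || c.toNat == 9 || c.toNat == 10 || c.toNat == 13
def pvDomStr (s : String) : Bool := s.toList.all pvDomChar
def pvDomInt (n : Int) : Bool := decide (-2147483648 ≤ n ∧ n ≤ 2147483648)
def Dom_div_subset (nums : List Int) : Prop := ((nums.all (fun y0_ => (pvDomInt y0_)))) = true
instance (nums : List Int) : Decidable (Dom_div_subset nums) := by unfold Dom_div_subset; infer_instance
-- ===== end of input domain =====

-- B keeps A's sort + quadratic DP but stores parent index pointers instead of
-- deep-copying each candidate chain inside the inner loop; the subset is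
-- reconstructed once at the end. Both A and B sort the argument list in place;
-- the equivalence proved is about the return value (the sort is the same in both).

-- ===== PORT A =====
-- inner loop body: for j in range(i): if nums[i]%nums[j]==0 and len(sub[j])+1>maxlen: …
def aInnerStep (xs : List Int) (S : List (List Int)) (i : Nat)
    (s : List Int × Nat) (j : Nat) : List Int × Nat :=
  if PySem.Int.mod (xs.getD i 0) (xs.getD j 0) = 0 ∧ (S.getD j []).length + 1 > s.2
  then ((S.getD j []) ++ [xs.getD i 0], (S.getD j []).length + 1)
  else s

-- one iteration of the outer loop (state: sub, maxlenl, maxsub)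
def aStep (xs : List Int) (st : List (List Int) × Nat × List Int) (i : Nat) :
    List (List Int) × Nat × List Int :=
  let r := (List.range i).foldl (aInnerStep xs st.1 i) (st.1.getD i [], 0)
  let sub' := st.1.set i r.1
  if r.1.length > st.2.1 then (sub', r.1.length, r.1) else (sub', st.2.1, st.2.2)

def div_subset (nums : List Int) : List Int :=
  if nums.length < 2 then
    []  -- Python A returns nums[0] here: an int (or IndexError on []), not a list; outside Pre_
  else
    let xs := PySem.List.sorted nums (fun x => x) false
    let r := (List.range' 1 (xs.length - 1)).foldl (aStep xs)
               (xs.map (fun x => [x]), 0, ([] : List Int))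
    r.2.2

-- ===== PORT B =====
-- inner loop body: accumulates (length[i], parent[i])
def bInnerStep (xs : List Int) (L : List Nat) (i : Nat)
    (s : Nat × Int) (j : Nat) : Nat × Int :=
  if PySem.Int.mod (xs.getD i 0) (xs.getD j 0) = 0 ∧ L.getD j 0 + 1 > s.1
  then (L.getD j 0 + 1, (j : Int))
  else s

def bStep (xs : List Int) (st : List Nat × List Int) (i : Nat) : List Nat × List Int :=
  let r := (List.range i).foldl (bInnerStep xs st.1 i) (1, -1)
  (st.1.set i r.1, st.2.set i r.2)

-- while i != -1: chain.append(nums[i]); i = parent[i]  (fuel bounds the loop; parents strictly decrease)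
def bChainRev (xs : List Int) (P : List Int) : Nat → Int → List Int
  | 0, _ => []
  | f + 1, i => if i = -1 then [] else xs.getD i.toNat 0 :: bChainRev xs P f (P.getD i.toNat (-1))

def div_subset_alt (nums : List Int) : List Int :=
  if nums.length < 2 then nums
  else
    let xs := PySem.List.sorted nums (fun x => x) false
    let n := xs.length
    let st := (List.range' 1 (n - 1)).foldl (bStep xs) (List.replicate n 1, List.replicate n (-1))
    let best := (List.range' 2 (n - 2)).foldl
      (fun b i => if st.1.getD i 0 > st.1.getD b 0 then i else b) 1
    (bChainRev xs st.2 n (best : Int)).reverse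

-- ===== PRECONDITION & SPEC =====
-- Pre_ excludes exactly: [] (A raises IndexError), singletons (A returns a bare int, not a list),
-- and lists where a 0 precedes another element after sorting (A raises ZeroDivisionError).
def Pre_div_subset (nums : List Int) : Prop :=
  2 ≤ nums.length ∧ ((0 : Int) ∈ nums → nums.count 0 = 1 ∧ ∀ x ∈ nums, x ≤ 0)
instance (nums : List Int) : Decidable (Pre_div_subset nums) := by
  unfold Pre_div_subset; infer_instance

def pvWitness_div_subset : List Int := [3, 9, 2, 8, 4]

def Spec_div_subset (nums : List Int) (out : List Int) : Prop := out = div_subset_alt nums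
instance (nums : List Int) (out : List Int) : Decidable (Spec_div_subset nums out) := by
  unfold Spec_div_subset; infer_instance

-- ===== CLAIM (what is proved, stated in full; the proofs are below) =====
def Claim_equal_div_subset : Prop :=
  ∀ (nums : List Int), Dom_div_subset nums → Pre_div_subset nums →
    Spec_div_subset nums (div_subset nums)

-- ===== LEMMAS AND PROOFS =====

-- getD/set helpers
theorem getD_set_self' {α : Type} (l : List α) (m : Nat) (a d : α) (h : m < l.length) :
    (l.set m a).getD m d = a := by
  simp [List.getD_eq_getElem?_getD, h]

theorem getD_set_ne' {α : Type} (l : List α) (m m' : Nat) (a d : α) (h : m ≠ m') :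
    (l.set m a).getD m' d = l.getD m' d := by
  simp [List.getD_eq_getElem?_getD, List.getElem?_set_ne, h]

theorem getD_map_singleton (xs : List Int) (m : Nat) (h : m < xs.length) :
    (xs.map (fun x => [x])).getD m [] = [xs.getD m 0] := by
  simp [List.getD_eq_getElem?_getD, List.getElem?_map, List.getElem?_eq_getElem h]

theorem getD_replicate' {α : Type} (n m : Nat) (v d : α) (h : m < n) :
    (List.replicate n v).getD m d = v := by
  simp [List.getD_eq_getElem?_getD, h]

-- the DP invariant coupling A's chain table S with B's (length, parent) tables
def DPInv (xs : List Int) (n k : Nat) (S : List (List Int)) (L : List Nat) (P : List Int) : Prop :=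
  S.length = n ∧ L.length = n ∧ P.length = n ∧
  (∀ m, m < n → (S.getD m []).length = L.getD m 0 ∧ 1 ≤ L.getD m 0) ∧
  (∀ m, m < n →
     (P.getD m (-1) = -1 ∧ S.getD m [] = [xs.getD m 0]) ∨
     (∃ p : Nat, P.getD m (-1) = (p : Int) ∧ p < m ∧
        S.getD m [] = S.getD p [] ++ [xs.getD m 0])) ∧
  (∀ m, m < n → (m = 0 ∨ k < m) →
     S.getD m [] = [xs.getD m 0] ∧ L.getD m 0 = 1 ∧ P.getD m (-1) = -1)

-- coupling of the two inner loops
def InRel (xs : List Int) (S : List (List Int)) (L : List Nat) (i : Nat)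
    (a : List Int × Nat) (b : Nat × Int) : Prop :=
  (b.2 = -1 ∧ a.1 = [xs.getD i 0] ∧ a.2 = 0 ∧ b.1 = 1) ∨
  (∃ p : Nat, b.2 = (p : Int) ∧ p < i ∧ a.1 = S.getD p [] ++ [xs.getD i 0] ∧
     a.2 = b.1 ∧ b.1 = L.getD p 0 + 1)

theorem inner_couple (xs : List Int) (S : List (List Int)) (L : List Nat) (i : Nat)
    (hlink : ∀ j, j < i → (S.getD j []).length = L.getD j 0 ∧ 1 ≤ L.getD j 0) :
    ∀ (l : List Nat), (∀ j ∈ l, j < i) → ∀ (a : List Int × Nat) (b : Nat × Int),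
      InRel xs S L i a b →
      InRel xs S L i (l.foldl (aInnerStep xs S i) a) (l.foldl (bInnerStep xs L i) b) := by
  intro l
  induction l with
  | nil => intro _ a b h; simpa using h
  | cons j t ih =>
    intro hmem a b h
    have hj : j < i := hmem j (by simp)
    have hstep : InRel xs S L i (aInnerStep xs S i a j) (bInnerStep xs L i b j) := by
      have hlj := hlink j hj
      rcases h with ⟨h2, ha, hml, hb1⟩ | ⟨p, hp, hpi, ha, hml, hb1⟩
      · -- no parent yet
        unfold aInnerStep bInnerStep
        by_cases hmod : PySem.Int.mod (xs.getD i 0) (xs.getD j 0) = 0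
        · have hca : (S.getD j []).length + 1 > a.2 := by omega
          have hcb : L.getD j 0 + 1 > b.1 := by omega
          rw [if_pos ⟨hmod, hca⟩, if_pos ⟨hmod, hcb⟩]
          exact Or.inr ⟨j, rfl, hj, rfl, by omega, by omega⟩
        · rw [if_neg (by tauto), if_neg (by tauto)]
          exact Or.inl ⟨h2, ha, hml, hb1⟩
      · -- parent p so far
        unfold aInnerStep bInnerStep
        by_cases hc : PySem.Int.mod (xs.getD i 0) (xs.getD j 0) = 0 ∧ L.getD j 0 + 1 > b.1
        · have hca : PySem.Int.mod (xs.getD i 0) (xs.getD j 0) = 0 ∧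
              (S.getD j []).length + 1 > a.2 := ⟨hc.1, by omega⟩
          rw [if_pos hca, if_pos hc]
          exact Or.inr ⟨j, rfl, hj, rfl, by omega, by omega⟩
        · have hca : ¬ (PySem.Int.mod (xs.getD i 0) (xs.getD j 0) = 0 ∧
              (S.getD j []).length + 1 > a.2) := by
            intro ⟨h1', h2'⟩; exact hc ⟨h1', by omega⟩
          rw [if_neg hca, if_neg hc]
          exact Or.inr ⟨p, hp, hpi, ha, hml, hb1⟩
    exact ih (fun j' hj' => hmem j' (by simp [hj'])) _ _ hstep

-- the best-index fold: bounds and congruence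
def bestOf (L : List Nat) (k : Nat) : Nat :=
  (List.range' 2 (k - 1)).foldl (fun b i => if L.getD i 0 > L.getD b 0 then i else b) 1

theorem best_fold_bound (L : List Nat) (k : Nat) :
    ∀ (l : List Nat), (∀ i ∈ l, 1 ≤ i ∧ i ≤ k) → ∀ b, 1 ≤ b → b ≤ k →
      1 ≤ l.foldl (fun b i => if L.getD i 0 > L.getD b 0 then i else b) b ∧
      l.foldl (fun b i => if L.getD i 0 > L.getD b 0 then i else b) b ≤ k := by
  intro l
  induction l with
  | nil => intro _ b h1 h2; exact ⟨h1, h2⟩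
  | cons j t ih =>
    intro hmem b h1 h2
    have hj := hmem j (by simp)
    simp only [List.foldl_cons]
    by_cases hc : L.getD j 0 > L.getD b 0
    · rw [if_pos hc]; exact ih (fun i hi => hmem i (by simp [hi])) j hj.1 hj.2
    · rw [if_neg hc]; exact ih (fun i hi => hmem i (by simp [hi])) b h1 h2

theorem best_fold_congr (L L' : List Nat) (k : Nat)
    (hagree : ∀ m, m ≤ k → L.getD m 0 = L'.getD m 0) :
    ∀ (l : List Nat), (∀ i ∈ l, i ≤ k) → ∀ b, b ≤ k →
      l.foldl (fun b i => if L.getD i 0 > L.getD b 0 then i else b) b =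
      l.foldl (fun b i => if L'.getD i 0 > L'.getD b 0 then i else b) b := by
  intro l
  induction l with
  | nil => intro _ b _; rfl
  | cons j t ih =>
    intro hmem b hb
    have hj := hmem j (by simp)
    simp only [List.foldl_cons]
    have hcond : (L.getD j 0 > L.getD b 0) ↔ (L'.getD j 0 > L'.getD b 0) := by
      rw [hagree j hj, hagree b hb]
    by_cases hc : L'.getD j 0 > L'.getD b 0
    · rw [if_pos (hcond.mpr hc), if_pos hc]; exact ih (fun i hi => hmem i (by simp [hi])) j hj
    · rw [if_neg (fun h => hc (hcond.mp h)), if_neg hc]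
      exact ih (fun i hi => hmem i (by simp [hi])) b hb

theorem mem_range'_le (s n i : Nat) (h : i ∈ List.range' s n) : s ≤ i ∧ i ≤ s + n - 1 := by
  rw [List.mem_range'] at h
  obtain ⟨j, hj, rfl⟩ := h
  omega

theorem bestOf_bound (L : List Nat) (k : Nat) (hk : 1 ≤ k) :
    1 ≤ bestOf L k ∧ bestOf L k ≤ k := by
  unfold bestOf
  exact best_fold_bound L k _ (fun i hi => by
    have := mem_range'_le 2 (k - 1) i hi; omega) 1 le_rfl hk

-- main coupled induction over the outer loop
theorem main_inv (xs : List Int) (n : Nat) (hn : n = xs.length) (h2 : 2 ≤ n) :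
    ∀ k, k ≤ n - 1 →
      DPInv xs n k
        ((List.range' 1 k).foldl (aStep xs) (xs.map (fun x => [x]), 0, ([] : List Int))).1
        ((List.range' 1 k).foldl (bStep xs) (List.replicate n 1, List.replicate n (-1))).1
        ((List.range' 1 k).foldl (bStep xs) (List.replicate n 1, List.replicate n (-1))).2 ∧
      (1 ≤ k →
        ((List.range' 1 k).foldl (aStep xs) (xs.map (fun x => [x]), 0, ([] : List Int))).2.1 =
          ((List.range' 1 k).foldl (bStep xs) (List.replicate n 1, List.replicate n (-1))).1.getD
            (bestOf ((List.range' 1 k).foldl (bStep xs) (List.replicate n 1, List.replicate n (-1))).1 k) 0 ∧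
        ((List.range' 1 k).foldl (aStep xs) (xs.map (fun x => [x]), 0, ([] : List Int))).2.2 =
          ((List.range' 1 k).foldl (aStep xs) (xs.map (fun x => [x]), 0, ([] : List Int))).1.getD
            (bestOf ((List.range' 1 k).foldl (bStep xs) (List.replicate n 1, List.replicate n (-1))).1 k) []) := by
  intro k
  induction k with
  | zero =>
    intro _
    simp only [List.range', List.foldl_nil]
    refine ⟨⟨by simp [hn], by simp, by simp, ?_, ?_, ?_⟩, by omega⟩
    · intro m hm
      rw [getD_map_singleton xs m (by omega), getD_replicate' n m 1 0 hm]
      simp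
    · intro m hm
      exact Or.inl ⟨getD_replicate' n m (-1) (-1) hm, getD_map_singleton xs m (by omega)⟩
    · intro m hm _
      exact ⟨getD_map_singleton xs m (by omega), getD_replicate' n m 1 0 hm,
             getD_replicate' n m (-1) (-1) hm⟩
  | succ k ih =>
    intro hk1
    have hr : List.range' 1 (k + 1) = List.range' 1 k ++ [k + 1] := by
      rw [List.range'_1_concat, show 1 + k = k + 1 from by omega]
    rw [hr]
    simp only [List.foldl_append, List.foldl_cons, List.foldl_nil]
    set A := (List.range' 1 k).foldl (aStep xs) (xs.map (fun x => [x]), 0, ([] : List Int)) with hA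
    set B := (List.range' 1 k).foldl (bStep xs) (List.replicate n 1, List.replicate n (-1)) with hB
    obtain ⟨⟨hSl, hLl, hPl, hlink, hparent, huntouched⟩, hsel⟩ := ih (by omega)
    have hik : k + 1 < n := by omega
    -- the coupled inner loops
    have hstart : A.1.getD (k + 1) [] = [xs.getD (k + 1) 0] :=
      (huntouched (k + 1) hik (Or.inr (by omega))).1
    set ra := (List.range (k + 1)).foldl (aInnerStep xs A.1 (k + 1)) (A.1.getD (k + 1) [], 0) with hra
    set rb := (List.range (k + 1)).foldl (bInnerStep xs B.1 (k + 1)) (1, -1) with hrb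
    have hcouple : InRel xs A.1 B.1 (k + 1) ra rb := by
      exact inner_couple xs A.1 B.1 (k + 1) (fun j hj => hlink j (by omega))
        (List.range (k + 1)) (fun j hj => List.mem_range.mp hj) _ _
        (Or.inl ⟨rfl, hstart, rfl, rfl⟩)
    have hcl : ra.1.length = rb.1 := by
      rcases hcouple with ⟨_, ha, _, hb1⟩ | ⟨p, _, hpi, ha, _, hb1⟩
      · rw [ha, hb1]; rfl
      · rw [ha, hb1, List.length_append, (hlink p (by omega)).1]; rfl
    have hli1 : 1 ≤ rb.1 := by
      rcases hcouple with ⟨_, _, _, hb1⟩ | ⟨p, _, _, _, _, hb1⟩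
      · omega
      · have := (hlink p (by omega)).2; omega
    have hcur : (rb.2 = -1 ∧ ra.1 = [xs.getD (k + 1) 0]) ∨
        (∃ p : Nat, rb.2 = (p : Int) ∧ p < k + 1 ∧
          ra.1 = A.1.getD p [] ++ [xs.getD (k + 1) 0]) := by
      rcases hcouple with ⟨h1, h2, _, _⟩ | ⟨p, h1, h2, h3, _, _⟩
      · exact Or.inl ⟨h1, h2⟩
      · exact Or.inr ⟨p, h1, h2, h3⟩
    -- shapes of the two steps
    have haS : (aStep xs A (k + 1)).1 = A.1.set (k + 1) ra.1 := by
      simp only [aStep, ← hra]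
      split <;> rfl
    have haSel : (aStep xs A (k + 1)).2 =
        if ra.1.length > A.2.1 then (ra.1.length, ra.1) else (A.2.1, A.2.2) := by
      simp only [aStep, ← hra]
      split <;> rfl
    have hbL : (bStep xs B (k + 1)).1 = B.1.set (k + 1) rb.1 := rfl
    have hbP : (bStep xs B (k + 1)).2 = B.2.set (k + 1) rb.2 := rfl
    rw [haS, hbL, hbP]
    have hS'len : (A.1.set (k + 1) ra.1).length = n := by rw [List.length_set, hSl]
    have hL'len : (B.1.set (k + 1) rb.1).length = n := by rw [List.length_set, hLl]
    have hgS : ∀ m, m ≠ k + 1 → (A.1.set (k + 1) ra.1).getD m [] = A.1.getD m [] :=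
      fun m hm => getD_set_ne' A.1 (k + 1) m ra.1 [] (fun h => hm h.symm)
    have hgL : ∀ m, m ≠ k + 1 → (B.1.set (k + 1) rb.1).getD m 0 = B.1.getD m 0 :=
      fun m hm => getD_set_ne' B.1 (k + 1) m rb.1 0 (fun h => hm h.symm)
    have hgP : ∀ m, m ≠ k + 1 → (B.2.set (k + 1) rb.2).getD m (-1) = B.2.getD m (-1) :=
      fun m hm => getD_set_ne' B.2 (k + 1) m rb.2 (-1) (fun h => hm h.symm)
    have hgSi : (A.1.set (k + 1) ra.1).getD (k + 1) [] = ra.1 :=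
      getD_set_self' A.1 (k + 1) ra.1 [] (by omega)
    have hgLi : (B.1.set (k + 1) rb.1).getD (k + 1) 0 = rb.1 :=
      getD_set_self' B.1 (k + 1) rb.1 0 (by omega)
    have hgPi : (B.2.set (k + 1) rb.2).getD (k + 1) (-1) = rb.2 :=
      getD_set_self' B.2 (k + 1) rb.2 (-1) (by omega)
    constructor
    · -- the invariant
      refine ⟨hS'len, hL'len, by rw [List.length_set, hPl], ?_, ?_, ?_⟩
      · intro m hm
        by_cases hmi : m = k + 1
        · subst hmi
          rw [hgSi, hgLi]
          exact ⟨hcl, hli1⟩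
        · rw [hgS m hmi, hgL m hmi]
          exact hlink m hm
      · intro m hm
        by_cases hmi : m = k + 1
        · subst hmi
          rcases hcur with ⟨h1, h2⟩ | ⟨p, h1, h2, h3⟩
          · exact Or.inl ⟨by rw [hgPi, h1], by rw [hgSi, h2]⟩
          · refine Or.inr ⟨p, by rw [hgPi, h1], h2, ?_⟩
            rw [hgSi, hgS p (by omega), h3]
        · rcases Nat.lt_or_ge m (k + 1) with hlt | hge
          · rcases hparent m hm with ⟨h1, h2⟩ | ⟨p, h1, h2, h3⟩
            · exact Or.inl ⟨by rw [hgP m hmi, h1], by rw [hgS m hmi, h2]⟩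
            · exact Or.inr ⟨p, by rw [hgP m hmi, h1], h2,
                by rw [hgS m hmi, hgS p (by omega), h3]⟩
          · have hu := huntouched m hm (Or.inr (by omega))
            exact Or.inl ⟨by rw [hgP m hmi, hu.2.2], by rw [hgS m hmi, hu.1]⟩
      · intro m hm hcase
        have hmi : m ≠ k + 1 := by omega
        rw [hgS m hmi, hgL m hmi, hgP m hmi]
        exact huntouched m hm (by omega)
    · -- the selection link
      intro _
      rw [haSel]
      by_cases hk0 : k = 0
      · subst hk0
        have hA0 : A = (xs.map (fun x => [x]), 0, ([] : List Int)) := by rw [hA]; rfl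
        have hml0 : A.2.1 = 0 := by rw [hA0]
        have hms : ra.1.length > A.2.1 := by omega
        rw [if_pos hms]
        have hb' : bestOf (B.1.set (0 + 1) rb.1) (0 + 1) = 1 := rfl
        rw [hb']
        exact ⟨by rw [hgLi, ← hcl], by rw [hgSi]⟩
      · have hk1' : 1 ≤ k := by omega
        obtain ⟨hml, hms⟩ := hsel hk1'
        obtain ⟨hbl, hbu⟩ := bestOf_bound B.1 k hk1'
        set b := bestOf B.1 k with hbdef
        have hbne : b ≠ k + 1 := by omega
        have hb' : bestOf (B.1.set (k + 1) rb.1) (k + 1) = 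
            if (B.1.set (k + 1) rb.1).getD (k + 1) 0 > (B.1.set (k + 1) rb.1).getD b 0
            then k + 1 else b := by
          unfold bestOf
          have hsplit : List.range' 2 (k + 1 - 1) = List.range' 2 (k - 1) ++ [k + 1] := by
            rw [show k + 1 - 1 = (k - 1) + 1 from by omega, List.range'_1_concat,
                show 2 + (k - 1) = k + 1 from by omega]
          rw [hsplit, List.foldl_append, List.foldl_cons, List.foldl_nil]
          rw [← best_fold_congr B.1 (B.1.set (k + 1) rb.1) k
                (fun m hm => (hgL m (by omega)).symm) (List.range' 2 (k - 1))
                (fun i hi => by have := mem_range'_le 2 (k - 1) i hi; omega) 1 (by omega)]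
          rfl
        rw [hb', hgLi, hgL b hbne, ← hml, hcl]
        by_cases hgt : rb.1 > A.2.1
        · simp only [if_pos hgt]
          exact ⟨hgLi.symm, hgSi.symm⟩
        · simp only [if_neg hgt]
          exact ⟨by rw [hgL b hbne, ← hml], by rw [hgS b hbne, ← hms]⟩

-- chain reconstruction equals A's stored chain
theorem chain_rec (xs : List Int) (S : List (List Int)) (P : List Int) (n : Nat)
    (hpar : ∀ m, m < n →
      (P.getD m (-1) = -1 ∧ S.getD m [] = [xs.getD m 0]) ∨
      (∃ p : Nat, P.getD m (-1) = (p : Int) ∧ p < m ∧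
         S.getD m [] = S.getD p [] ++ [xs.getD m 0])) :
    ∀ fuel m, m < n → m < fuel →
      (bChainRev xs P fuel ((m : Nat) : Int)).reverse = S.getD m [] := by
  intro fuel
  induction fuel with
  | zero => intro m _ h; omega
  | succ f ih =>
    intro m hmn hmf
    have hne : ((m : Nat) : Int) ≠ -1 := by omega
    rw [bChainRev, if_neg hne]
    simp only [Int.toNat_natCast]
    rcases hpar m hmn with ⟨hp, hs⟩ | ⟨p, hp, hpm, hs⟩
    · rw [hp]
      have : bChainRev xs P f (-1) = [] := by
        cases f with
        | zero => rfl
        | succ f' => rw [bChainRev, if_pos rfl]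
      rw [this, hs]
      simp
    · rw [hp, List.reverse_cons, ih p (by omega) (by omega), hs]

theorem div_subset_spec : Claim_equal_div_subset := by
  intro nums _ hpre
  obtain ⟨hlen, -⟩ := hpre
  unfold Spec_div_subset div_subset div_subset_alt
  have hnl : ¬ nums.length < 2 := by omega
  rw [if_neg hnl, if_neg hnl]
  dsimp only
  set xs := PySem.List.sorted nums (fun x => x) false with hxs
  have hxl : xs.length = nums.length := PySem.List.length_sorted nums (fun x => x) false
  have h2 : 2 ≤ xs.length := by omega
  obtain ⟨hinv, hsel⟩ := main_inv xs xs.length rfl h2 (xs.length - 1) le_rfl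
  obtain ⟨hSl, hLl, hPl, hlink, hparent, huntouched⟩ := hinv
  set A := (List.range' 1 (xs.length - 1)).foldl (aStep xs)
    (xs.map (fun x => [x]), 0, ([] : List Int)) with hA
  set B := (List.range' 1 (xs.length - 1)).foldl (bStep xs)
    (List.replicate xs.length 1, List.replicate xs.length (-1)) with hB
  have hk1 : 1 ≤ xs.length - 1 := by omega
  obtain ⟨hml, hms⟩ := hsel hk1
  set b := bestOf B.1 (xs.length - 1) with hbdef
  obtain ⟨hbl, hbu⟩ := bestOf_bound B.1 (xs.length - 1) hk1
  have hbfold : (List.range' 2 (xs.length - 2)).foldl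
      (fun bb i => if B.1.getD i 0 > B.1.getD bb 0 then i else bb) 1 = b := by
    rw [hbdef]
    unfold bestOf
    rw [show xs.length - 1 - 1 = xs.length - 2 from by omega]
  have hchain : (bChainRev xs B.2 xs.length ((b : Nat) : Int)).reverse = A.1.getD b [] :=
    chain_rec xs A.1 B.2 xs.length hparent xs.length b (by omega) (by omega)
  rw [hms, hbfold, hchain]


-- ===== VERDICT (by name: the statement is the Claim_ definition above) =====
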